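-- pv_equiv track=rewrite | github.com/marshal0004/codemanager | flask-server/app/services/comparison_service.py | _enhance_diff_styling
-- ===== SOURCE A (Python) =====
-- def _enhance_diff_styling(html: str) -> str:
--     """Add modern CSS classes for better styling"""
--     enhancements = {
--         "diff_header": "diff-header bg-gray-100 dark:bg-gray-800 p-2 rounded-t",
--         "diff_next": "diff-nav inline-flex items-center px-3 py-1 bg-blue-500 text-white rounded",
--         "diff_add": "diff-add bg-green-50 dark:bg-green-900/20 border-l-4 border-green-500",
--         "diff_chg": "diff-change bg-yellow-50 dark:bg-yellow-900/20 border-l-4 border-yellow-500",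
--         "diff_sub": "diff-delete bg-red-50 dark:bg-red-900/20 border-l-4 border-red-500",
--     }
--
--     for old_class, new_class in enhancements.items():
--         html = html.replace(f'class="{old_class}"', f'class="{new_class}"')
--
--     return html
-- ===== SOURCE B (Python) =====
-- def _enhance_diff_styling(html: str) -> str:
--     """Add modern CSS classes for better styling"""
--     enhancements = {
--         "diff_header": "diff-header bg-gray-100 dark:bg-gray-800 p-2 rounded-t",
--         "diff_next": "diff-nav inline-flex items-center px-3 py-1 bg-blue-500 text-white rounded",
--         "diff_add": "diff-add bg-green-50 dark:bg-green-900/20 border-l-4 border-green-500",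
--         "diff_chg": "diff-change bg-yellow-50 dark:bg-yellow-900/20 border-l-4 border-yellow-500",
--         "diff_sub": "diff-delete bg-red-50 dark:bg-red-900/20 border-l-4 border-red-500",
--     }
--     targets = [('class="%s"' % old, 'class="%s"' % new)
--                for old, new in enhancements.items()]
--
--     # one left-to-right pass: at each position substitute the (unique) matching
--     # target, otherwise copy the character
--     out = []
--     i = 0
--     n = len(html)
--     while i < n:
--         for old, new in targets:
--             if html.startswith(old, i):
--                 out.append(new)
--                 i += len(old)
--                 break
--         else:
--             out.append(html[i])
--             i += 1
--     return ''.join(out)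
-- ===== Notes on version B (the rewrite author's own statement) =====
-- stated objective: alternative
-- what changed: A rewrites the whole string five times, once per CSS class via sequential str.replace passes; B makes a single left-to-right pass that at each position substitutes the first (unique) matching target from the same table and otherwise copies the character.
import Mathlib
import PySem

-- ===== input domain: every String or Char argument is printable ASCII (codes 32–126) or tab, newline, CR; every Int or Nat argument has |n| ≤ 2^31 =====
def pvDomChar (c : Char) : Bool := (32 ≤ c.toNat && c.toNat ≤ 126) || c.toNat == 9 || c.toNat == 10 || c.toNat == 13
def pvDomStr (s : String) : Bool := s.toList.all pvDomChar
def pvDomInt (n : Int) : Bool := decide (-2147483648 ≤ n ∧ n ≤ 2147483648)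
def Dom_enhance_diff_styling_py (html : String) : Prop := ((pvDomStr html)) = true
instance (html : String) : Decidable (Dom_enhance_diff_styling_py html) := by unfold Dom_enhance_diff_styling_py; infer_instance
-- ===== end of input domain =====

-- B replaces A's five sequential full-string `.replace` passes by a single left-to-right
-- pass that substitutes the unique matching target at each position (objective: alternative).

-- ===== PORT A =====
def enhance_diff_styling_py (html : String) : String :=
  -- the dict is iterated in insertion order; each iteration is one str.replace pass
  let h1 := PySem.Str.replace html "class=\"diff_header\"" "class=\"diff-header bg-gray-100 dark:bg-gray-800 p-2 rounded-t\""
  let h2 := PySem.Str.replace h1 "class=\"diff_next\"" "class=\"diff-nav inline-flex items-center px-3 py-1 bg-blue-500 text-white rounded\""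
  let h3 := PySem.Str.replace h2 "class=\"diff_add\"" "class=\"diff-add bg-green-50 dark:bg-green-900/20 border-l-4 border-green-500\""
  let h4 := PySem.Str.replace h3 "class=\"diff_chg\"" "class=\"diff-change bg-yellow-50 dark:bg-yellow-900/20 border-l-4 border-yellow-500\""
  let h5 := PySem.Str.replace h4 "class=\"diff_sub\"" "class=\"diff-delete bg-red-50 dark:bg-red-900/20 border-l-4 border-red-500\""
  h5

-- ===== PORT B =====
-- Source B's `targets` list: (old, new) pairs, dict insertion order
def pvO1 : List Char := "class=\"diff_header\"".toList
def pvN1 : List Char := "class=\"diff-header bg-gray-100 dark:bg-gray-800 p-2 rounded-t\"".toList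
def pvO2 : List Char := "class=\"diff_next\"".toList
def pvN2 : List Char := "class=\"diff-nav inline-flex items-center px-3 py-1 bg-blue-500 text-white rounded\"".toList
def pvO3 : List Char := "class=\"diff_add\"".toList
def pvN3 : List Char := "class=\"diff-add bg-green-50 dark:bg-green-900/20 border-l-4 border-green-500\"".toList
def pvO4 : List Char := "class=\"diff_chg\"".toList
def pvN4 : List Char := "class=\"diff-change bg-yellow-50 dark:bg-yellow-900/20 border-l-4 border-yellow-500\"".toList
def pvO5 : List Char := "class=\"diff_sub\"".toList
def pvN5 : List Char := "class=\"diff-delete bg-red-50 dark:bg-red-900/20 border-l-4 border-red-500\"".toList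

def pvTargets : List (List Char × List Char) :=
  [(pvO1, pvN1), (pvO2, pvN2), (pvO3, pvN3), (pvO4, pvN4), (pvO5, pvN5)]

-- Source B's while-loop; the inner for-with-break is "first matching target" (find?)
def pvScan : List Char → List Char
  | [] => []
  | c :: t =>
    match pvTargets.find? (fun p => p.1.isPrefixOf (c :: t)) with
    | some (o, n) => n ++ pvScan (t.drop (o.length - 1))
    | none => c :: pvScan t
termination_by s => s.length
decreasing_by
  · simp only [List.length_drop, List.length_cons]; omega
  · simp

def enhance_diff_styling_py_alt (html : String) : String :=
  String.ofList (pvScan html.toList)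

-- ===== PRECONDITION & SPEC =====
def Spec_enhance_diff_styling_py (html : String) (out : String) : Prop := out = enhance_diff_styling_py_alt html
instance (html : String) (out : String) : Decidable (Spec_enhance_diff_styling_py html out) := by unfold Spec_enhance_diff_styling_py; infer_instance

-- ===== CLAIM (what is proved, stated in full; the proofs are below) =====
def Claim_equal_enhance_diff_styling_py : Prop := ∀ (html : String), Dom_enhance_diff_styling_py html → Spec_enhance_diff_styling_py html (enhance_diff_styling_py html)

-- ===== LEMMAS AND PROOFS =====

-- a clean structural form of Python's str.replace (for a nonempty pattern)
def pvRep (o n : List Char) : List Char → List Char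
  | [] => []
  | c :: t =>
    if o.isPrefixOf (c :: t) then n ++ pvRep o n (t.drop (o.length - 1))
    else c :: pvRep o n t
termination_by s => s.length
decreasing_by
  · simp only [List.length_drop, List.length_cons]; omega
  · simp

lemma pvRep_nil (o n : List Char) : pvRep o n [] = [] := by simp [pvRep]

lemma pvRep_skip1 (o n : List Char) (c : Char) (t : List Char) (h : ¬ o <+: (c :: t)) :
    pvRep o n (c :: t) = c :: pvRep o n t := by
  rw [pvRep]
  simp [List.isPrefixOf_iff_prefix, h]

lemma pvRep_fire (o n t : List Char) (ho : o ≠ []) :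
    pvRep o n (o ++ t) = n ++ pvRep o n t := by
  cases o with
  | nil => exact absurd rfl ho
  | cons c o' =>
    rw [List.cons_append, pvRep]
    simp [List.isPrefixOf_iff_prefix, List.prefix_append]

lemma pvRep_skip (o n : List Char) :
    ∀ (p t : List Char), (∀ m < p.length, ¬ o <+: p.drop m ∧ ¬ p.drop m <+: o) →
    pvRep o n (p ++ t) = p ++ pvRep o n t := by
  intro p
  induction p with
  | nil => intro t _; simp
  | cons c p' ih =>
    intro t hp
    have h0 := hp 0 (by simp)
    have hnot : ¬ o <+: (c :: (p' ++ t)) := by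
      intro h
      rcases List.prefix_or_prefix_of_prefix h (List.prefix_append (c :: p') t) with h' | h'
      · exact h0.1 (by simpa using h')
      · exact h0.2 (by simpa using h')
    rw [List.cons_append, pvRep_skip1 o n c (p' ++ t) hnot,
      ih t (fun m hm => hp (m + 1) (by simpa using Nat.succ_lt_succ hm))]
    simp

-- PySem's replace equals pvRep for a nonempty pattern
lemma go_eq (o n : List Char) (ho : o ≠ []) :
    ∀ (fuel : Nat) (s acc : List Char), s.length ≤ fuel →
    PySem.Chars.replace.go o n fuel s acc = acc.reverse ++ pvRep o n s := by
  intro fuel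
  induction fuel with
  | zero =>
    intro s acc hs
    have : s = [] := by cases s <;> simp_all
    subst this
    simp [PySem.Chars.replace.go, pvRep_nil]
  | succ f ih =>
    intro s acc hs
    cases s with
    | nil => simp [PySem.Chars.replace.go, pvRep_nil]
    | cons c t =>
      rw [PySem.Chars.replace.go]
      by_cases h : o.isPrefixOf (c :: t)
      · have holen : 1 ≤ o.length := by
          cases o with | nil => exact absurd rfl ho | cons _ _ => simp
        rw [if_pos h, ih _ _ (by simp at hs ⊢; omega)]
        rw [pvRep, if_pos h]
        have : List.drop o.length (c :: t) = List.drop (o.length - 1) t := by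
          cases o with | nil => exact absurd rfl ho | cons _ o' => simp
        rw [this]
        simp
      · rw [if_neg h, ih t (c :: acc) (by simp at hs ⊢; omega)]
        rw [pvRep_skip1 o n c t (fun hp => h (List.isPrefixOf_iff_prefix.mpr hp))]
        simp

lemma replace_eq_pvRep (s o n : List Char) (ho : o ≠ []) :
    PySem.Chars.replace s o n = pvRep o n s := by
  rw [PySem.Chars.replace]
  rw [if_neg (by simpa [List.isEmpty_iff] using ho)]
  simpa using go_eq o n ho s.length s [] le_rfl

-- if pattern o does not match at the head, it still does not match there after the
-- tail is rewritten with (o', n'), provided no nonempty suffix of o is a prefix of n'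
-- and n' is longer than o
lemma pvRep_nofire (o' n' o : List Char)
    (hlen : o.length < n'.length)
    (hc : ∀ m < o.length, ¬ o.drop m <+: n') :
    ∀ (t w : List Char), w <:+ o → w ≠ [] → ¬ w <+: t → ¬ w <+: pvRep o' n' t := by
  intro t
  induction t using pvRep.induct o' with
  | case1 =>
    intro w _ hne _ hw
    rw [pvRep_nil] at hw
    exact hne (List.prefix_nil.mp hw)
  | case2 c t hfire ihdrop =>
    intro w hsuf hne hnt hw
    rw [pvRep, if_pos hfire] at hw
    rcases List.prefix_or_prefix_of_prefix hw (List.prefix_append n' _) with h' | h'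
    · obtain ⟨v, hv⟩ := hsuf
      have hm : o.drop v.length = w := by rw [← hv]; simp
      have hlt : v.length < o.length := by
        have := congrArg List.length hv
        simp only [List.length_append] at this
        cases w with
        | nil => exact absurd rfl hne
        | cons _ _ => simp at this; omega
      exact hc v.length hlt (hm ▸ h')
    · have h1 : n'.length ≤ w.length := h'.length_le
      have h2 : w.length ≤ o.length := hsuf.length_le
      omega
  | case3 c t hfire ih =>
    intro w hsuf hne hnt hw
    rw [pvRep, if_neg hfire] at hw
    cases w with
    | nil => exact hne rfl
    | cons d w' =>
      obtain ⟨rfl, hw'⟩ : d = c ∧ w' <+: pvRep o' n' t := by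
        simpa [List.cons_prefix_cons] using hw
      cases w' with
      | nil => exact hnt (by simp)
      | cons e w'' =>
        exact ih (e :: w'') (List.IsSuffix.trans ⟨[d], rfl⟩ hsuf)
          (by simp)
          (fun hp => hnt (by simpa [List.cons_prefix_cons] using hp)) hw'

lemma pvRep_nofire_cons (o' n' o : List Char)
    (hlen : o.length < n'.length)
    (hc : ∀ m < o.length, ¬ o.drop m <+: n')
    (c : Char) (u : List Char) (h : ¬ o <+: c :: u) :
    ¬ o <+: c :: pvRep o' n' u := by
  intro hw
  cases o with
  | nil => exact h (by simp)
  | cons d o'' =>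
    obtain ⟨rfl, ho''⟩ : d = c ∧ o'' <+: pvRep o' n' u := by
      simpa [List.cons_prefix_cons] using hw
    cases o'' with
    | nil => exact h (by simp)
    | cons e o''' =>
      exact pvRep_nofire o' n' (d :: e :: o''') hlen hc u (e :: o''')
        ⟨[d], rfl⟩ (by simp)
        (fun hp => h (by simpa [List.cons_prefix_cons] using hp)) ho''

-- the A-side chain of five pvRep passes
def pvChain (s : List Char) : List Char :=
  pvRep pvO5 pvN5 (pvRep pvO4 pvN4 (pvRep pvO3 pvN3 (pvRep pvO2 pvN2 (pvRep pvO1 pvN1 s))))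

lemma find?_none (c : Char) (t : List Char)
    (h1 : ¬ pvO1 <+: c :: t) (h2 : ¬ pvO2 <+: c :: t) (h3 : ¬ pvO3 <+: c :: t)
    (h4 : ¬ pvO4 <+: c :: t) (h5 : ¬ pvO5 <+: c :: t) :
    pvTargets.find? (fun p => p.1.isPrefixOf (c :: t)) = none := by
  have b1 : pvO1.isPrefixOf (c :: t) = false := by
    rw [← Bool.not_eq_true, List.isPrefixOf_iff_prefix]; exact h1
  have b2 : pvO2.isPrefixOf (c :: t) = false := by
    rw [← Bool.not_eq_true, List.isPrefixOf_iff_prefix]; exact h2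
  have b3 : pvO3.isPrefixOf (c :: t) = false := by
    rw [← Bool.not_eq_true, List.isPrefixOf_iff_prefix]; exact h3
  have b4 : pvO4.isPrefixOf (c :: t) = false := by
    rw [← Bool.not_eq_true, List.isPrefixOf_iff_prefix]; exact h4
  have b5 : pvO5.isPrefixOf (c :: t) = false := by
    rw [← Bool.not_eq_true, List.isPrefixOf_iff_prefix]; exact h5
  simp only [pvTargets, List.find?, b1, b2, b3, b4, b5]

-- main induction: the five sequential replaces equal the single pass
set_option maxHeartbeats 1600000 in
lemma chain_eq_scan : ∀ (N : Nat) (s : List Char), s.length ≤ N → pvChain s = pvScan s := by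
  intro N
  induction N with
  | zero =>
    intro s hs
    have : s = [] := by cases s <;> simp_all
    subst this
    simp [pvChain, pvRep_nil, pvScan]
  | succ N ih =>
    intro s hs
    cases s with
    | nil => simp [pvChain, pvRep_nil, pvScan]
    | cons c t =>
      by_cases h1 : pvO1 <+: c :: t
      ·
        obtain ⟨u, hu⟩ := h1
        have hut : u = t.drop (pvO1.length - 1) := by
          have := congrArg (List.drop pvO1.length) hu
          rw [List.drop_left] at this
          rw [this]; rfl
        have hul : u.length ≤ N := by
          have hlen := congrArg List.length hu
          have hol : 1 ≤ pvO1.length := by decide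
          simp only [List.length_append, List.length_cons] at hlen
          simp at hs; omega
        have hchain : pvChain (c :: t) = pvN1 ++ pvChain u := by
          rw [pvChain, ← hu,
              pvRep_fire pvO1 pvN1 _ (by decide),
              pvRep_skip pvO2 pvN2 pvN1 _ (by decide),
              pvRep_skip pvO3 pvN3 pvN1 _ (by decide),
              pvRep_skip pvO4 pvN4 pvN1 _ (by decide),
              pvRep_skip pvO5 pvN5 pvN1 _ (by decide)]
          rfl
        have hfind : pvTargets.find? (fun p => p.1.isPrefixOf (c :: t)) = some (pvO1, pvN1) := by
          have b1 : pvO1.isPrefixOf (c :: t) = true := by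
            rw [List.isPrefixOf_iff_prefix]; exact ⟨u, hu⟩
          simp only [pvTargets, List.find?, b1]
        rw [hchain, pvScan, hfind]
        show pvN1 ++ pvChain u = pvN1 ++ pvScan (t.drop (pvO1.length - 1))
        rw [← hut, ih u hul]
      ·
        by_cases h2 : pvO2 <+: c :: t
        ·
          obtain ⟨u, hu⟩ := h2
          have hut : u = t.drop (pvO2.length - 1) := by
            have := congrArg (List.drop pvO2.length) hu
            rw [List.drop_left] at this
            rw [this]; rfl
          have hul : u.length ≤ N := by
            have hlen := congrArg List.length hu
            have hol : 1 ≤ pvO2.length := by decide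
            simp only [List.length_append, List.length_cons] at hlen
            simp at hs; omega
          have hchain : pvChain (c :: t) = pvN2 ++ pvChain u := by
            rw [pvChain, ← hu,
                pvRep_skip pvO1 pvN1 pvO2 _ (by decide),
                pvRep_fire pvO2 pvN2 _ (by decide),
                pvRep_skip pvO3 pvN3 pvN2 _ (by decide),
                pvRep_skip pvO4 pvN4 pvN2 _ (by decide),
                pvRep_skip pvO5 pvN5 pvN2 _ (by decide)]
            rfl
          have hfind : pvTargets.find? (fun p => p.1.isPrefixOf (c :: t)) = some (pvO2, pvN2) := by
            have b1 : pvO1.isPrefixOf (c :: t) = false := by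
              rw [← Bool.not_eq_true, List.isPrefixOf_iff_prefix]; exact h1
            have b2 : pvO2.isPrefixOf (c :: t) = true := by
              rw [List.isPrefixOf_iff_prefix]; exact ⟨u, hu⟩
            simp only [pvTargets, List.find?, b1, b2]
          rw [hchain, pvScan, hfind]
          show pvN2 ++ pvChain u = pvN2 ++ pvScan (t.drop (pvO2.length - 1))
          rw [← hut, ih u hul]
        ·
          by_cases h3 : pvO3 <+: c :: t
          ·
            obtain ⟨u, hu⟩ := h3
            have hut : u = t.drop (pvO3.length - 1) := by
              have := congrArg (List.drop pvO3.length) hu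
              rw [List.drop_left] at this
              rw [this]; rfl
            have hul : u.length ≤ N := by
              have hlen := congrArg List.length hu
              have hol : 1 ≤ pvO3.length := by decide
              simp only [List.length_append, List.length_cons] at hlen
              simp at hs; omega
            have hchain : pvChain (c :: t) = pvN3 ++ pvChain u := by
              rw [pvChain, ← hu,
                  pvRep_skip pvO1 pvN1 pvO3 _ (by decide),
                  pvRep_skip pvO2 pvN2 pvO3 _ (by decide),
                  pvRep_fire pvO3 pvN3 _ (by decide),
                  pvRep_skip pvO4 pvN4 pvN3 _ (by decide),
                  pvRep_skip pvO5 pvN5 pvN3 _ (by decide)]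
              rfl
            have hfind : pvTargets.find? (fun p => p.1.isPrefixOf (c :: t)) = some (pvO3, pvN3) := by
              have b1 : pvO1.isPrefixOf (c :: t) = false := by
                rw [← Bool.not_eq_true, List.isPrefixOf_iff_prefix]; exact h1
              have b2 : pvO2.isPrefixOf (c :: t) = false := by
                rw [← Bool.not_eq_true, List.isPrefixOf_iff_prefix]; exact h2
              have b3 : pvO3.isPrefixOf (c :: t) = true := by
                rw [List.isPrefixOf_iff_prefix]; exact ⟨u, hu⟩
              simp only [pvTargets, List.find?, b1, b2, b3]
            rw [hchain, pvScan, hfind]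
            show pvN3 ++ pvChain u = pvN3 ++ pvScan (t.drop (pvO3.length - 1))
            rw [← hut, ih u hul]
          ·
            by_cases h4 : pvO4 <+: c :: t
            ·
              obtain ⟨u, hu⟩ := h4
              have hut : u = t.drop (pvO4.length - 1) := by
                have := congrArg (List.drop pvO4.length) hu
                rw [List.drop_left] at this
                rw [this]; rfl
              have hul : u.length ≤ N := by
                have hlen := congrArg List.length hu
                have hol : 1 ≤ pvO4.length := by decide
                simp only [List.length_append, List.length_cons] at hlen
                simp at hs; omega
              have hchain : pvChain (c :: t) = pvN4 ++ pvChain u := by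
                rw [pvChain, ← hu,
                    pvRep_skip pvO1 pvN1 pvO4 _ (by decide),
                    pvRep_skip pvO2 pvN2 pvO4 _ (by decide),
                    pvRep_skip pvO3 pvN3 pvO4 _ (by decide),
                    pvRep_fire pvO4 pvN4 _ (by decide),
                    pvRep_skip pvO5 pvN5 pvN4 _ (by decide)]
                rfl
              have hfind : pvTargets.find? (fun p => p.1.isPrefixOf (c :: t)) = some (pvO4, pvN4) := by
                have b1 : pvO1.isPrefixOf (c :: t) = false := by
                  rw [← Bool.not_eq_true, List.isPrefixOf_iff_prefix]; exact h1
                have b2 : pvO2.isPrefixOf (c :: t) = false := by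
                  rw [← Bool.not_eq_true, List.isPrefixOf_iff_prefix]; exact h2
                have b3 : pvO3.isPrefixOf (c :: t) = false := by
                  rw [← Bool.not_eq_true, List.isPrefixOf_iff_prefix]; exact h3
                have b4 : pvO4.isPrefixOf (c :: t) = true := by
                  rw [List.isPrefixOf_iff_prefix]; exact ⟨u, hu⟩
                simp only [pvTargets, List.find?, b1, b2, b3, b4]
              rw [hchain, pvScan, hfind]
              show pvN4 ++ pvChain u = pvN4 ++ pvScan (t.drop (pvO4.length - 1))
              rw [← hut, ih u hul]
            ·
              by_cases h5 : pvO5 <+: c :: t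
              ·
                obtain ⟨u, hu⟩ := h5
                have hut : u = t.drop (pvO5.length - 1) := by
                  have := congrArg (List.drop pvO5.length) hu
                  rw [List.drop_left] at this
                  rw [this]; rfl
                have hul : u.length ≤ N := by
                  have hlen := congrArg List.length hu
                  have hol : 1 ≤ pvO5.length := by decide
                  simp only [List.length_append, List.length_cons] at hlen
                  simp at hs; omega
                have hchain : pvChain (c :: t) = pvN5 ++ pvChain u := by
                  rw [pvChain, ← hu,
                      pvRep_skip pvO1 pvN1 pvO5 _ (by decide),
                      pvRep_skip pvO2 pvN2 pvO5 _ (by decide),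
                      pvRep_skip pvO3 pvN3 pvO5 _ (by decide),
                      pvRep_skip pvO4 pvN4 pvO5 _ (by decide),
                      pvRep_fire pvO5 pvN5 _ (by decide)]
                  rfl
                have hfind : pvTargets.find? (fun p => p.1.isPrefixOf (c :: t)) = some (pvO5, pvN5) := by
                  have b1 : pvO1.isPrefixOf (c :: t) = false := by
                    rw [← Bool.not_eq_true, List.isPrefixOf_iff_prefix]; exact h1
                  have b2 : pvO2.isPrefixOf (c :: t) = false := by
                    rw [← Bool.not_eq_true, List.isPrefixOf_iff_prefix]; exact h2
                  have b3 : pvO3.isPrefixOf (c :: t) = false := by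
                    rw [← Bool.not_eq_true, List.isPrefixOf_iff_prefix]; exact h3
                  have b4 : pvO4.isPrefixOf (c :: t) = false := by
                    rw [← Bool.not_eq_true, List.isPrefixOf_iff_prefix]; exact h4
                  have b5 : pvO5.isPrefixOf (c :: t) = true := by
                    rw [List.isPrefixOf_iff_prefix]; exact ⟨u, hu⟩
                  simp only [pvTargets, List.find?, b1, b2, b3, b4, b5]
                rw [hchain, pvScan, hfind]
                show pvN5 ++ pvChain u = pvN5 ++ pvScan (t.drop (pvO5.length - 1))
                rw [← hut, ih u hul]
              ·
                -- no target matches at the head: both sides keep c and recurse on t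
                have hts : t.length ≤ N := by simp at hs; omega
                have k2_1 : ¬ pvO2 <+: c :: pvRep pvO1 pvN1 t :=
                  pvRep_nofire_cons pvO1 pvN1 pvO2 (by decide) (by decide) c t h2
                have k3_1 : ¬ pvO3 <+: c :: pvRep pvO1 pvN1 t :=
                  pvRep_nofire_cons pvO1 pvN1 pvO3 (by decide) (by decide) c t h3
                have k3_2 : ¬ pvO3 <+: c :: pvRep pvO2 pvN2 (pvRep pvO1 pvN1 t) :=
                  pvRep_nofire_cons pvO2 pvN2 pvO3 (by decide) (by decide) c _ k3_1
                have k4_1 : ¬ pvO4 <+: c :: pvRep pvO1 pvN1 t :=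
                  pvRep_nofire_cons pvO1 pvN1 pvO4 (by decide) (by decide) c t h4
                have k4_2 : ¬ pvO4 <+: c :: pvRep pvO2 pvN2 (pvRep pvO1 pvN1 t) :=
                  pvRep_nofire_cons pvO2 pvN2 pvO4 (by decide) (by decide) c _ k4_1
                have k4_3 : ¬ pvO4 <+: c :: pvRep pvO3 pvN3 (pvRep pvO2 pvN2 (pvRep pvO1 pvN1 t)) :=
                  pvRep_nofire_cons pvO3 pvN3 pvO4 (by decide) (by decide) c _ k4_2
                have k5_1 : ¬ pvO5 <+: c :: pvRep pvO1 pvN1 t :=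
                  pvRep_nofire_cons pvO1 pvN1 pvO5 (by decide) (by decide) c t h5
                have k5_2 : ¬ pvO5 <+: c :: pvRep pvO2 pvN2 (pvRep pvO1 pvN1 t) :=
                  pvRep_nofire_cons pvO2 pvN2 pvO5 (by decide) (by decide) c _ k5_1
                have k5_3 : ¬ pvO5 <+: c :: pvRep pvO3 pvN3 (pvRep pvO2 pvN2 (pvRep pvO1 pvN1 t)) :=
                  pvRep_nofire_cons pvO3 pvN3 pvO5 (by decide) (by decide) c _ k5_2
                have k5_4 : ¬ pvO5 <+: c :: pvRep pvO4 pvN4 (pvRep pvO3 pvN3 (pvRep pvO2 pvN2 (pvRep pvO1 pvN1 t))) :=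
                  pvRep_nofire_cons pvO4 pvN4 pvO5 (by decide) (by decide) c _ k5_3
                have hchain : pvChain (c :: t) = c :: pvChain t := by
                  rw [pvChain,
                      pvRep_skip1 pvO1 pvN1 c t h1,
                      pvRep_skip1 pvO2 pvN2 c _ k2_1,
                      pvRep_skip1 pvO3 pvN3 c _ k3_2,
                      pvRep_skip1 pvO4 pvN4 c _ k4_3,
                      pvRep_skip1 pvO5 pvN5 c _ k5_4]
                  rfl
                rw [hchain, pvScan, find?_none c t h1 h2 h3 h4 h5]
                show c :: pvChain t = c :: pvScan t
                rw [ih t hts]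

lemma toList_A (html : String) :
    (enhance_diff_styling_py html).toList = pvChain html.toList := by
  simp only [enhance_diff_styling_py, PySem.Str.toList_replace]
  rw [replace_eq_pvRep html.toList "class=\"diff_header\"".toList _ (by decide),
    replace_eq_pvRep _ "class=\"diff_next\"".toList _ (by decide),
    replace_eq_pvRep _ "class=\"diff_add\"".toList _ (by decide),
    replace_eq_pvRep _ "class=\"diff_chg\"".toList _ (by decide),
    replace_eq_pvRep _ "class=\"diff_sub\"".toList _ (by decide)]
  rfl

lemma toList_B (html : String) :
    (enhance_diff_styling_py_alt html).toList = pvScan html.toList := by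
  rw [enhance_diff_styling_py_alt, String.toList_ofList]

-- ===== VERDICT (by name: the statement is the Claim_ definition above) =====
theorem enhance_diff_styling_py_spec : Claim_equal_enhance_diff_styling_py := by
  intro html _
  unfold Spec_enhance_diff_styling_py
  apply String.toList_inj.mp
  rw [toList_A, toList_B, chain_eq_scan html.toList.length html.toList le_rfl]
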